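-- pv_equiv track=rewrite | github.com/SamPom100/MLU | SimpleTabular/cata_clean.py | split_authors
-- ===== SOURCE A (Python) =====
-- def split_authors(data):
--
--   authors = list(data)
--
--   A1 = []
--   A2 = []
--   A3 = []
--   A4 = []
--   A5 = []
--   A6 = []
--   A7 = []
--   for i in authors:
--
--     try :
--       A1.append(i.split(',')[0].strip().upper())
--     except :
--       A1.append('NONE')
--
--     try :
--       A2.append(i.split(',')[1].strip().upper())
--     except :
--       A2.append('NONE')
--
--     try :
--       A3.append(i.split(',')[2].strip().upper())
--     except :
--       A3.append('NONE')
--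
--     try :
--       A4.append(i.split(',')[3].strip().upper())
--     except :
--       A4.append('NONE')
--
--     try :
--       A5.append(i.split(',')[4].strip().upper())
--     except :
--       A5.append('NONE')
--
--     try :
--       A6.append(i.split(',')[5].strip().upper())
--     except :
--       A6.append('NONE')
--
--     try :
--       A7.append(i.split(',')[6].strip().upper())
--     except :
--       A7.append('NONE')
--
--
--   return A1,A2,A3,A4,A5,A6,A7
-- ===== SOURCE B (Python) =====
-- def _row(i):
--     parts = i.split(',')
--     f = lambda j: parts[j].strip().upper() if j < len(parts) else 'NONE'
--     return f(0), f(1), f(2), f(3), f(4), f(5), f(6)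
--
--
-- def split_authors(data):
--     rows = [_row(i) for i in data]
--     return ([r[0] for r in rows], [r[1] for r in rows], [r[2] for r in rows],
--             [r[3] for r in rows], [r[4] for r in rows], [r[5] for r in rows],
--             [r[6] for r in rows])
-- ===== Notes on version B (the rewrite author's own statement) =====
-- stated objective: faster
-- what changed: Replaces the seven interleaved try/except append blocks (each re-splitting the string) with one pass that splits each string once into a normalized 7-entry row, then reads the seven columns off the row list.
import Mathlib
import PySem

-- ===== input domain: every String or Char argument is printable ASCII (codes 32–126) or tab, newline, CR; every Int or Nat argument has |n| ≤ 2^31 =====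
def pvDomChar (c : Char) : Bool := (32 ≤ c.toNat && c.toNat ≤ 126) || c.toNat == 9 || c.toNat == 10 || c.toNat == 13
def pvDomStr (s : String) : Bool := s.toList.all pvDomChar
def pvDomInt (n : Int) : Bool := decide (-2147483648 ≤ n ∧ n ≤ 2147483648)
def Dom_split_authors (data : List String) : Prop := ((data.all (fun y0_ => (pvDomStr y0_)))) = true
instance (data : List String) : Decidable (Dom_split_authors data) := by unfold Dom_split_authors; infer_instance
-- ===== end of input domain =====

-- B builds one normalized 7-entry row per string and reads the columns off the row list,
-- instead of A's seven interleaved try/except appends; same values, simpler decomposition.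

-- ===== PORT A =====
-- i.split(',') — sep "," is non-empty, so split? always returns some (getD never fires)
def pyCommaSplit (i : String) : List String := (PySem.Str.split? i ",").getD []

-- try: parts[k].strip().upper() except: 'NONE'  (the only exception possible is the IndexError,
-- modelled by pyGet? = none)
def tryEntry (parts : List String) (k : Int) : String :=
  match PySem.List.pyGet? parts k with
  | some s => PySem.Str.upper (PySem.Str.strip s)
  | none => "NONE"

def split_authors (data : List String) : List String × List String × List String × List String × List String × List String × List String :=
  data.foldl
    (fun acc i =>
      let parts := pyCommaSplit i
      (acc.1 ++ [tryEntry parts 0],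
       acc.2.1 ++ [tryEntry parts 1],
       acc.2.2.1 ++ [tryEntry parts 2],
       acc.2.2.2.1 ++ [tryEntry parts 3],
       acc.2.2.2.2.1 ++ [tryEntry parts 4],
       acc.2.2.2.2.2.1 ++ [tryEntry parts 5],
       acc.2.2.2.2.2.2 ++ [tryEntry parts 6]))
    ([], [], [], [], [], [], [])

-- ===== PORT B =====
def rowOf (i : String) : String × String × String × String × String × String × String :=
  let parts := pyCommaSplit i
  let f : Nat → String := fun j =>
    if j < parts.length then PySem.Str.upper (PySem.Str.strip (parts.getD j "")) else "NONE"
  (f 0, f 1, f 2, f 3, f 4, f 5, f 6)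

def split_authors_alt (data : List String) : List String × List String × List String × List String × List String × List String × List String :=
  let rows := data.map rowOf
  (rows.map (·.1), rows.map (·.2.1), rows.map (·.2.2.1), rows.map (·.2.2.2.1),
   rows.map (·.2.2.2.2.1), rows.map (·.2.2.2.2.2.1), rows.map (·.2.2.2.2.2.2))

-- ===== PRECONDITION & SPEC =====
def Spec_split_authors (data : List String) (out : List String × List String × List String × List String × List String × List String × List String) : Prop := out = split_authors_alt data
instance (data : List String) (out : List String × List String × List String × List String × List String × List String × List String) : Decidable (Spec_split_authors data out) := by
  unfold Spec_split_authors
  -- built stepwise: default instance search exceeds its size limit on the 7-fold product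
  haveI d1 : DecidableEq (List String) := inferInstance
  haveI d2 : DecidableEq (List String × List String) := instDecidableEqProd
  haveI d3 : DecidableEq (List String × List String × List String) := instDecidableEqProd
  haveI d4 : DecidableEq (List String × List String × List String × List String) := instDecidableEqProd
  haveI d5 : DecidableEq (List String × List String × List String × List String × List String) := instDecidableEqProd
  haveI d6 : DecidableEq (List String × List String × List String × List String × List String × List String) := instDecidableEqProd
  exact instDecidableEqProd _ _

-- ===== CLAIM (what is proved, stated in full; the proofs are below) =====
def Claim_equal_split_authors : Prop := ∀ (data : List String), Dom_split_authors data → Spec_split_authors data (split_authors data)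

-- ===== LEMMAS AND PROOFS =====
theorem tryEntry_eq (parts : List String) (k : Nat) :
    tryEntry parts (k : Int) =
      (if k < parts.length then PySem.Str.upper (PySem.Str.strip (parts.getD k "")) else "NONE") := by
  unfold tryEntry
  rw [PySem.List.pyGet?_natCast]
  by_cases h : k < parts.length
  · simp [h, List.getD_eq_getElem?_getD]
  · simp [h]

theorem split_authors_fold (data : List String)
    (a1 a2 a3 a4 a5 a6 a7 : List String) :
    data.foldl
      (fun acc i =>
        let parts := pyCommaSplit i
        (acc.1 ++ [tryEntry parts 0],
         acc.2.1 ++ [tryEntry parts 1],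
         acc.2.2.1 ++ [tryEntry parts 2],
         acc.2.2.2.1 ++ [tryEntry parts 3],
         acc.2.2.2.2.1 ++ [tryEntry parts 4],
         acc.2.2.2.2.2.1 ++ [tryEntry parts 5],
         acc.2.2.2.2.2.2 ++ [tryEntry parts 6]))
      (a1, a2, a3, a4, a5, a6, a7) =
    (a1 ++ (data.map rowOf).map (·.1),
     a2 ++ (data.map rowOf).map (·.2.1),
     a3 ++ (data.map rowOf).map (·.2.2.1),
     a4 ++ (data.map rowOf).map (·.2.2.2.1),
     a5 ++ (data.map rowOf).map (·.2.2.2.2.1),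
     a6 ++ (data.map rowOf).map (·.2.2.2.2.2.1),
     a7 ++ (data.map rowOf).map (·.2.2.2.2.2.2)) := by
  induction data generalizing a1 a2 a3 a4 a5 a6 a7 with
  | nil => simp
  | cons i t ih =>
    simp only [List.foldl_cons, List.map_cons]
    rw [ih]
    have h0 := tryEntry_eq (pyCommaSplit i) 0
    have h1 := tryEntry_eq (pyCommaSplit i) 1
    have h2 := tryEntry_eq (pyCommaSplit i) 2
    have h3 := tryEntry_eq (pyCommaSplit i) 3
    have h4 := tryEntry_eq (pyCommaSplit i) 4
    have h5 := tryEntry_eq (pyCommaSplit i) 5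
    have h6 := tryEntry_eq (pyCommaSplit i) 6
    simp only [Nat.cast_ofNat, Nat.cast_zero, Nat.cast_one] at h0 h1 h2 h3 h4 h5 h6
    simp [rowOf, h0, h1, h2, h3, h4, h5, h6]

-- ===== VERDICT (by name: the statement is the Claim_ definition above) =====
theorem split_authors_spec : Claim_equal_split_authors := by
  intro data _
  unfold Spec_split_authors split_authors split_authors_alt
  rw [split_authors_fold]
  simp
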